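-- pv_equiv track=rewrite | github.com/dolag233/Dolag-Houdini-Toolset | python/python2.7libs/Dolag/_pathutils.py | increaseFileName
-- ===== SOURCE A (Python) =====
-- def increaseFileName(file_name, has_suffix=True):
--     suffix = ''
--
--     if has_suffix:
--         suffix = '.' + str(file_name.split('.')[-1:][0])
--         file_name = '.'.join(file_name.split('.')[:-1])
--
--     # get version number
--     version_start = 0
--     version = getVersionNum(file_name)
--     if version is None or len(version) == 0:
--         return file_name + '_0' + suffix
--
--     # get reversed version
--     version_rev = version[::-1]
--     # for "abc123", the version_start is 3
--     version_start = len(file_name) - len(version)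
--     carry = 0
--     for i in range(len(version_rev)):
--         dig = version_rev[i]
--         dig += carry
--         if i == 0:
--             dig += 1
--
--         if dig >= 10:
--             carry = 1
--             dig -= 10
--
--         else:
--             carry = 0
--
--         version_rev[i] = dig
--
--         if i == len(version_rev) - 1 and carry:
--             version_rev.append(1)
--
--     version = version_rev[::-1]
--     # convert to digital version
--     version = ''.join(list(map(str, version)))
--     file_name = file_name[:version_start] + version + suffix
--     return file_name
--
-- def getVersionNum(filename):
--     if not isinstance(filename, str):
--         return None
--
--     number = []
--     for i in range(len(filename)):
--         char = filename[-i - 1]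
--         if char.isdigit():
--             number.append(int(char))
--
--         else:
--             if i == 0:
--                 return None
--
--             break
--
--     number.reverse()
--     return number
-- ===== SOURCE B (Python) =====
-- def increaseFileName(file_name, has_suffix=True):
--     suffix = ''
--     if has_suffix:
--         suffix = '.' + file_name.split('.')[-1:][0]
--         file_name = '.'.join(file_name.split('.')[:-1])
--
--     # locate the trailing run of ASCII digits
--     pos = len(file_name)
--     while pos > 0 and '0' <= file_name[pos - 1] <= '9':
--         pos -= 1
--     digits = file_name[pos:]
--
--     if not digits:
--         return file_name + '_0' + suffix
--
--     # increment arithmetically, keeping the original zero-padded width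
--     value = 0
--     for ch in digits:
--         value = value * 10 + (ord(ch) - 48)
--     return file_name[:pos] + str(value + 1).zfill(len(digits)) + suffix
-- ===== Notes on version B (the rewrite author's own statement) =====
-- stated objective: simpler
-- what changed: A extracts the trailing digits into a reversed int list and runs a hand-written digit-by-digit carry loop (appending a digit on overflow) before joining the digits back into a string; B locates the trailing digit run, converts it to one integer, adds one, and zero-pads str(value+1) back to the original width with zfill, dropping the carry loop and the list reversals.
import Mathlib
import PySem

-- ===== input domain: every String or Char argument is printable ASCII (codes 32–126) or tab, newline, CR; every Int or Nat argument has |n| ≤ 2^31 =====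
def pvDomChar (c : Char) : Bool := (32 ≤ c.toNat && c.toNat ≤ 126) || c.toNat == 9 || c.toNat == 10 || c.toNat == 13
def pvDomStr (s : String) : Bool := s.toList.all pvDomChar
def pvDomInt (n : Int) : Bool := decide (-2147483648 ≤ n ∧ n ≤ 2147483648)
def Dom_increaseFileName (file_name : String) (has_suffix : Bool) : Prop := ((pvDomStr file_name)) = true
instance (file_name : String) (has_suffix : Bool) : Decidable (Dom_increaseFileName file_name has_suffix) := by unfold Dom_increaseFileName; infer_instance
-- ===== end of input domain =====

-- B replaces A's hand-written reversed digit-list carry loop by plain integer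
-- arithmetic: it reads the trailing digit run, adds one, and re-pads with zfill
-- to the original width (objective: simpler).

-- ===== PORT A =====

-- int(char) for a single ASCII digit char is its code point minus 48
-- (exact: every call is guarded by char.isdigit()).
def digitVal (c : Char) : Int := (c.toNat : Int) - 48

-- the `for i in range(len(filename))` loop of getVersionNum, with its break/returns
def gvnGo (cs : List Char) (i : Nat) (num : List Int) : Option (List Int) :=
  if _h : i < cs.length then
    -- filename[-i - 1]; the index is always in range here, so getD's default is never used
    let char := (PySem.List.pyGet? cs (-(i : Int) - 1)).getD ' '
    if PySem.Chars.isdigit char then gvnGo cs (i + 1) (num ++ [digitVal char])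
    else if i = 0 then none
    else some num
  else some num
termination_by cs.length - i

-- isinstance(filename, str) is always true for our String argument, so that
-- branch is dropped; `number.reverse(); return number` is the final .map List.reverse
def getVersionNum (filename : List Char) : Option (List Int) :=
  (gvnGo filename 0 []).map List.reverse

-- the carry loop of increaseFileName over version_rev (in-place writes become
-- rebuilding the list; the `append 1 on final carry` is the two-element last case)
def aloop : List Int → Int → Bool → List Int
  | [], _, _ => []
  | [d], carry, first =>
    let dig := d + carry + (if first then 1 else 0)
    if 10 ≤ dig then [dig - 10, 1] else [dig]
  | d :: rest, carry, first =>
    let dig := d + carry + (if first then 1 else 0)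
    if 10 ≤ dig then (dig - 10) :: aloop rest 1 false else dig :: aloop rest 0 false

def increaseFileName (file_name : String) (has_suffix : Bool) : String :=
  let fn0 := file_name.toList
  -- suffix = '.' + str(file_name.split('.')[-1:][0]) ; str() of a str is the identity.
  -- split('.') is never empty, so [-1:][0] is in range and getD's default is never used
  let suffix : List Char :=
    if has_suffix then
      '.' :: ((PySem.List.pyGet? (PySem.List.slice (PySem.Chars.splitOn fn0 ['.']) (some (-1)) none) 0).getD [])
    else []
  let fn : List Char :=
    if has_suffix then PySem.Chars.join ['.'] (PySem.List.slice (PySem.Chars.splitOn fn0 ['.']) none (some (-1)))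
    else fn0
  match getVersionNum fn with
  | none => String.ofList (fn ++ ['_', '0'] ++ suffix)
  | some version =>
    if version.length = 0 then String.ofList (fn ++ ['_', '0'] ++ suffix)
    else
      let version_start := fn.length - version.length
      let version_rev := version.reverse   -- version[::-1] (PySem.List.slice?_none_none_neg_one)
      let out := (aloop version_rev 0 true).reverse   -- the loop, then version = version_rev[::-1]
      let vchars := PySem.Chars.join [] (out.map PySem.Int.toChars)   -- ''.join(list(map(str, version)))
      String.ofList (PySem.List.slice fn none (some (version_start : Int)) ++ vchars ++ suffix)

-- ===== PORT B =====

-- the `while pos > 0 and '0' <= file_name[pos-1] <= '9': pos -= 1` scan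
-- (file_name[pos-1] is always in range here, so getD's default is never used)
def bpos (cs : List Char) (pos : Nat) : Nat :=
  if _h : 0 < pos then
    let c := cs.getD (pos - 1) ' '
    if '0' ≤ c ∧ c ≤ '9' then bpos cs (pos - 1) else pos
  else pos

def increaseFileName_alt (file_name : String) (has_suffix : Bool) : String :=
  let fn0 := file_name.toList
  let suffix : List Char :=
    if has_suffix then
      '.' :: ((PySem.List.pyGet? (PySem.List.slice (PySem.Chars.splitOn fn0 ['.']) (some (-1)) none) 0).getD [])
    else []
  let fn : List Char :=
    if has_suffix then PySem.Chars.join ['.'] (PySem.List.slice (PySem.Chars.splitOn fn0 ['.']) none (some (-1)))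
    else fn0
  let pos := bpos fn fn.length
  let digits := PySem.List.slice fn (some (pos : Int)) none   -- file_name[pos:]
  if digits = [] then String.ofList (fn ++ ['_', '0'] ++ suffix)
  else
    let value := digits.foldl (fun n ch => n * 10 + ((ch.toNat : Int) - 48)) 0
    String.ofList (PySem.List.slice fn none (some (pos : Int)) ++
      PySem.Chars.zfill (PySem.Int.toChars (value + 1)) (digits.length : Int) ++ suffix)

-- ===== PRECONDITION & SPEC =====
def Spec_increaseFileName (file_name : String) (has_suffix : Bool) (out : String) : Prop := out = increaseFileName_alt file_name has_suffix
instance (file_name : String) (has_suffix : Bool) (out : String) : Decidable (Spec_increaseFileName file_name has_suffix out) := by unfold Spec_increaseFileName; infer_instance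

-- ===== CLAIM (what is proved, stated in full; the proofs are below) =====
def Claim_equal_increaseFileName : Prop := ∀ (file_name : String) (has_suffix : Bool), Dom_increaseFileName file_name has_suffix → Spec_increaseFileName file_name has_suffix (increaseFileName file_name has_suffix)

-- ===== LEMMAS AND PROOFS =====

-- big-endian decimal digit characters of a natural number (the value of Nat.toDigits 10)
def D10 (n : Nat) : List Char :=
  if h : n < 10 then [Nat.digitChar n] else D10 (n / 10) ++ [Nat.digitChar (n % 10)]
decreasing_by exact Nat.div_lt_self (by omega) (by omega)

-- value of a little-endian digit list
def valLE (l : List Int) : Int := List.foldr (fun d r => d + 10 * r) 0 l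

def isDig (d : Int) : Prop := 0 ≤ d ∧ d ≤ 9

lemma toDigitsCore_eq_D10 (f n : Nat) (acc : List Char) (hf : n < 10 ^ f) (hf0 : 0 < f) :
    Nat.toDigitsCore 10 f n acc = D10 n ++ acc := by
  induction f generalizing n acc with
  | zero => omega
  | succ f ih =>
    show (let d := Nat.digitChar (n % 10); let n' := n / 10;
          if n' = 0 then d :: acc else Nat.toDigitsCore 10 f n' (d :: acc)) = D10 n ++ acc
    by_cases h : n / 10 = 0
    · have hn : n < 10 := by omega
      rw [D10]
      simp [hn, h, Nat.mod_eq_of_lt hn]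
    · have hfpos : 0 < f := by
        rcases Nat.eq_zero_or_pos f with hf1 | hf1
        · subst hf1; simp at hf; omega
        · exact hf1
      have hlt : n / 10 < 10 ^ f := by
        have : n < 10 ^ f * 10 := by rw [← pow_succ]; exact hf
        exact Nat.div_lt_of_lt_mul (by omega)
      simp only [h, if_false]
      have hn : ¬ n < 10 := by
        intro hc; exact h (Nat.div_eq_of_lt hc)
      conv_rhs => rw [D10]
      rw [dif_neg hn, ih (n / 10) _ hlt hfpos]
      simp

lemma toChars_nonneg (v : Int) (hv : 0 ≤ v) : PySem.Int.toChars v = D10 v.toNat := by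
  unfold PySem.Int.toChars
  rw [if_neg (by omega)]
  show Nat.toDigitsCore 10 (v.toNat + 1) v.toNat [] = _
  rw [toDigitsCore_eq_D10 _ _ _ ?_ (by omega), List.append_nil]
  calc v.toNat < 10 ^ v.toNat := Nat.lt_pow_self (by omega)
    _ ≤ 10 ^ (v.toNat + 1) := Nat.pow_le_pow_right (by omega) (by omega)

lemma D10_digits (n : Nat) : ∀ c ∈ D10 n, PySem.Chars.isdigit c = true := by
  induction n using Nat.strong_induction_on with
  | _ n ih =>
    rw [D10]
    split
    · rename_i h
      intro c hc
      simp at hc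
      subst hc
      interval_cases n <;> decide
    · rename_i h
      intro c hc
      simp at hc
      rcases hc with hc | hc
      · exact ih (n / 10) (Nat.div_lt_self (by omega) (by omega)) c hc
      · subst hc
        have : n % 10 < 10 := Nat.mod_lt _ (by omega)
        interval_cases h10 : (n % 10) <;> decide

lemma D10_ne_nil (n : Nat) : D10 n ≠ [] := by
  rw [D10]; split <;> simp

lemma zfill_nosign (s : List Char) (w : Int)
    (hs : ∀ c ∈ s, PySem.Chars.isdigit c = true) (hne : s ≠ []) :
    PySem.Chars.zfill s w = List.replicate (w.toNat - s.length) '0' ++ s := by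
  unfold PySem.Chars.zfill
  split
  · rename_i hle
    have h0 : w.toNat - s.length = 0 := by omega
    rw [h0]
    simp
  · rename_i hgt
    cases s with
    | nil => exact absurd rfl hne
    | cons c rest =>
      have hc := hs c (by simp)
      simp only []
      rw [if_neg ?_]
      intro hor
      rcases hor with rfl | rfl <;> simp [PySem.Chars.isdigit] at hc

lemma toChars_small (d : Int) (hd : isDig d) : PySem.Int.toChars d = [Nat.digitChar d.toNat] := by
  obtain ⟨h0, h9⟩ := hd
  rw [toChars_nonneg d h0, D10, dif_pos (by omega)]

lemma digitChar_isdigit (k : Nat) (h : k < 10) : PySem.Chars.isdigit (Nat.digitChar k) = true := by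
  interval_cases k <;> decide

lemma toChars_digits (v : Int) (hv : 0 ≤ v) : ∀ c ∈ PySem.Int.toChars v, PySem.Chars.isdigit c = true := by
  rw [toChars_nonneg v hv]
  exact D10_digits v.toNat

lemma toChars_ne_nil (v : Int) (hv : 0 ≤ v) : PySem.Int.toChars v ≠ [] := by
  rw [toChars_nonneg v hv]
  exact D10_ne_nil v.toNat

lemma toChars_mul_add (v e : Int) (hv : 0 < v) (he : isDig e) :
    PySem.Int.toChars (10 * v + e) = PySem.Int.toChars v ++ [Nat.digitChar e.toNat] := by
  obtain ⟨h0, h9⟩ := he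
  rw [toChars_nonneg _ (by omega), toChars_nonneg _ (by omega)]
  conv_lhs => rw [D10]
  rw [dif_neg (by omega)]
  have h1 : (10 * v + e).toNat / 10 = v.toNat := by omega
  have h2 : (10 * v + e).toNat % 10 = e.toNat := by omega
  rw [h1, h2]

-- appending one decimal digit on the right, under zfill
lemma zfill_append_digit (v e : Int) (w : Nat) (hv : 0 ≤ v) (he : isDig e) (hw : 1 ≤ w) :
    PySem.Chars.zfill (PySem.Int.toChars v) (w : Int) ++ [Nat.digitChar e.toNat]
      = PySem.Chars.zfill (PySem.Int.toChars (10 * v + e)) ((w : Int) + 1) := by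
  obtain ⟨he0, he9⟩ := he
  rcases eq_or_lt_of_le hv with hv0 | hv0
  · -- v = 0
    subst hv0
    have h10 : 10 * 0 + e = e := by omega
    rw [h10, toChars_small 0 ⟨le_refl 0, by omega⟩, toChars_small e ⟨he0, he9⟩]
    rw [zfill_nosign _ _ (by intro c hc; simp at hc; subst hc; decide) (by simp),
        zfill_nosign _ _ (by intro c hc; simp at hc; subst hc; exact digitChar_isdigit _ (by omega)) (by simp)]
    have h1 : ((w : Int)).toNat - [Nat.digitChar (0 : Int).toNat].length = w - 1 := by simp only [List.length_singleton]; omega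
    have h2 : ((w : Int) + 1).toNat - [Nat.digitChar e.toNat].length = w := by simp only [List.length_singleton]; omega
    rw [h1, h2]
    have hrep : List.replicate (w - 1) '0' ++ [Nat.digitChar (0 : Int).toNat] = List.replicate w '0' := by
      have hw' : w = (w - 1) + 1 := by omega
      conv_rhs => rw [hw', List.replicate_succ']
      congr 1
    rw [hrep]
  · -- 0 < v
    rw [toChars_mul_add v e hv0 ⟨he0, he9⟩]
    have hsd := toChars_digits v hv
    have hne := toChars_ne_nil v hv
    have hsd2 : ∀ c ∈ PySem.Int.toChars v ++ [Nat.digitChar e.toNat], PySem.Chars.isdigit c = true := by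
      intro c hc
      rw [List.mem_append] at hc
      rcases hc with hc | hc
      · exact hsd c hc
      · simp at hc; subst hc; exact digitChar_isdigit _ (by omega)
    rw [zfill_nosign _ _ hsd hne, zfill_nosign _ _ hsd2 (by simp)]
    have harith : ((w : Int) + 1).toNat - (PySem.Int.toChars v ++ [Nat.digitChar e.toNat]).length
        = ((w : Int)).toNat - (PySem.Int.toChars v).length := by
      simp only [List.length_append, List.length_singleton]
      omega
    rw [harith, List.append_assoc]

lemma join_empty_sep (lss : List (List Char)) : PySem.Chars.join [] lss = lss.flatten := by
  induction lss with
  | nil => simp [PySem.Chars.join_nil]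
  | cons p rest ih =>
    cases rest with
    | nil => simp [PySem.Chars.join_singleton]
    | cons q rest' =>
      rw [PySem.Chars.join_cons_cons, ih]
      simp

lemma valLE_cons (d : Int) (t : List Int) : valLE (d :: t) = d + 10 * valLE t := rfl

lemma valLE_nonneg (l : List Int) (h : ∀ d ∈ l, isDig d) : 0 ≤ valLE l := by
  induction l with
  | nil => simp [valLE]
  | cons d t ih =>
    have hd := h d (by simp)
    have ht := ih (fun x hx => h x (by simp [hx]))
    rw [valLE_cons]
    have := hd.1
    omega

lemma aloop_id (l : List Int) (h : ∀ d ∈ l, isDig d) : aloop l 0 false = l := by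
  induction l with
  | nil => rfl
  | cons d t ih =>
    obtain ⟨hd0, hd9⟩ := h d (by simp)
    cases t with
    | nil => simp [aloop]; omega
    | cons e t' =>
      have ht := ih (fun x hx => h x (by simp [hx]))
      simp [aloop, ht]
      omega

lemma aloop_carry (l : List Int) : aloop l 1 false = aloop l 0 true := by
  cases l with
  | nil => rfl
  | cons d t =>
    cases t with
    | nil => simp [aloop]
    | cons e t' => simp [aloop]

-- decimal printing of a (possibly zero-padded) little-endian digit list
lemma rep (m : List Int) (hne : m ≠ []) (h : ∀ d ∈ m, isDig d) :
    (m.reverse.map PySem.Int.toChars).flatten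
      = PySem.Chars.zfill (PySem.Int.toChars (valLE m)) (m.length : Int) := by
  induction m with
  | nil => exact absurd rfl hne
  | cons d t ih =>
    have hd := h d (by simp)
    cases t with
    | nil =>
      simp only [List.reverse_cons, List.reverse_nil, List.nil_append, List.map_cons, List.map_nil,
        List.flatten_cons, List.flatten_nil, List.append_nil, List.length_cons, List.length_nil]
      have hv : valLE [d] = d := by simp [valLE]
      rw [hv, toChars_small d hd]
      rw [zfill_nosign _ _ (by intro c hc; simp at hc; subst hc; exact digitChar_isdigit _ (by obtain ⟨a,b⟩ := hd; omega)) (by simp)]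
      simp
    | cons e t' =>
      have ht := ih (by simp) (fun x hx => h x (by simp [hx]))
      have hdigs : ∀ x ∈ (e :: t'), isDig x := fun x hx => h x (by simp [hx])
      have hsplit : (((d :: e :: t').reverse).map PySem.Int.toChars).flatten
          = (((e :: t').reverse).map PySem.Int.toChars).flatten ++ PySem.Int.toChars d := by
        simp
      rw [hsplit, ht, toChars_small d hd]
      rw [zfill_append_digit (valLE (e :: t')) d (e :: t').length (valLE_nonneg _ hdigs) hd (by simp)]
      congr 2
      all_goals simp only [valLE_cons]; ring

-- the heart: A's carry loop prints exactly B's zero-padded str(value + 1)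
lemma aloop_main (l : List Int) (hne : l ≠ []) (h : ∀ d ∈ l, isDig d) :
    ((aloop l 0 true).reverse.map PySem.Int.toChars).flatten
      = PySem.Chars.zfill (PySem.Int.toChars (valLE l + 1)) (l.length : Int) := by
  induction l with
  | nil => exact absurd rfl hne
  | cons d t ih =>
    obtain ⟨hd0, hd9⟩ := h d (by simp)
    cases t with
    | nil =>
      by_cases h10 : 10 ≤ d + 0 + 1
      · have hd : d = 9 := by omega
        subst hd
        decide
      · have hloop : aloop [d] 0 true = [d + 0 + 1] := by
          simp only [aloop, reduceIte]
          rw [if_neg h10]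
        have hv : valLE [d] + 1 = d + 0 + 1 := by simp only [valLE, List.foldr]; ring
        rw [hloop, hv]
        simp only [List.reverse_cons, List.reverse_nil, List.nil_append, List.map_cons, List.map_nil,
          List.flatten_cons, List.flatten_nil, List.append_nil, List.length_cons, List.length_nil]
        rw [toChars_small (d + 0 + 1) ⟨by omega, by omega⟩]
        rw [zfill_nosign _ _ (by intro c hc; simp at hc; subst hc; exact digitChar_isdigit _ (by omega)) (by simp)]
        simp
    | cons e t' =>
      have hdigs : ∀ x ∈ (e :: t'), isDig x := fun x hx => h x (by simp [hx])
      have hv0 : 0 ≤ valLE (e :: t') := valLE_nonneg _ hdigs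
      by_cases h10 : 10 ≤ d + 0 + 1
      · have hd : d = 9 := by omega
        subst hd
        have hloop : aloop (9 :: e :: t') 0 true = (9 + 0 + 1 - 10) :: aloop (e :: t') 1 false := by
          simp only [aloop, reduceIte]
          rw [if_pos h10]
        rw [hloop, aloop_carry]
        have ht := ih (by simp) hdigs
        rw [show (9 : Int) + 0 + 1 - 10 = 0 by norm_num]
        have hsplit : ((0 :: aloop (e :: t') 0 true).reverse.map PySem.Int.toChars).flatten
            = ((aloop (e :: t') 0 true).reverse.map PySem.Int.toChars).flatten ++ PySem.Int.toChars 0 := by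
          simp
        rw [hsplit, ht, toChars_small 0 ⟨le_refl 0, by omega⟩]
        rw [zfill_append_digit (valLE (e :: t') + 1) 0 (e :: t').length (by omega) ⟨le_refl 0, by omega⟩ (by simp)]
        congr 2
        all_goals simp only [valLE_cons]; ring
      · have hloop : aloop (d :: e :: t') 0 true = (d + 0 + 1) :: aloop (e :: t') 0 false := by
          simp only [aloop, reduceIte]
          rw [if_neg h10]
        rw [hloop, aloop_id _ hdigs]
        have hsplit : (((d + 0 + 1) :: e :: t').reverse.map PySem.Int.toChars).flatten
            = (((e :: t').reverse).map PySem.Int.toChars).flatten ++ PySem.Int.toChars (d + 0 + 1) := by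
          simp
        rw [hsplit, rep (e :: t') (by simp) hdigs, toChars_small (d + 0 + 1) ⟨by omega, by omega⟩]
        rw [zfill_append_digit (valLE (e :: t')) (d + 0 + 1) (e :: t').length hv0 ⟨by omega, by omega⟩ (by simp)]
        congr 2
        all_goals simp only [valLE_cons]; ring

lemma isdigit_iff (c : Char) : PySem.Chars.isdigit c = true ↔ ('0' ≤ c ∧ c ≤ '9') := by
  simp [PySem.Chars.isdigit]

lemma isdigit_val {c : Char} (h : PySem.Chars.isdigit c = true) : isDig (digitVal c) := by
  rw [isdigit_iff] at h
  obtain ⟨h1, h2⟩ := h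
  simp only [Char.le_def, UInt32.le_iff_toNat_le] at h1 h2
  unfold isDig digitVal
  have e1 : ('0').val.toNat = 48 := by decide
  have e2 : ('9').val.toNat = 57 := by decide
  rw [e1] at h1; rw [e2] at h2
  have : c.toNat = c.val.toNat := rfl
  omega

lemma pyGet_rev (cs : List Char) (i : Nat) (h : i < cs.length) :
    (PySem.List.pyGet? cs (-(i : Int) - 1)).getD ' ' = cs.reverse.getD i ' ' := by
  have h1 : PySem.List.pyIdx? cs.length (-(i : Int) - 1) = some (cs.length - (i + 1)) := by
    unfold PySem.List.pyIdx?
    rw [if_neg (by omega), if_pos (by omega)]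
    congr 1
    omega
  unfold PySem.List.pyGet?
  rw [h1]
  show (cs[cs.length - (i + 1)]?).getD ' ' = cs.reverse.getD i ' '
  rw [List.getD, List.getElem?_reverse (by simpa using h)]
  congr 2
  omega

lemma gvnGo_spec (cs : List Char) : ∀ i num, i ≤ cs.length →
    gvnGo cs i num =
      if i < cs.length ∧ i = 0 ∧ ¬ (PySem.Chars.isdigit (cs.reverse.getD i ' ') = true) then none
      else some (num ++ ((cs.reverse.drop i).takeWhile PySem.Chars.isdigit).map digitVal) := by
  have H : ∀ k i num, cs.length - i ≤ k → i ≤ cs.length →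
      gvnGo cs i num =
        if i < cs.length ∧ i = 0 ∧ ¬ (PySem.Chars.isdigit (cs.reverse.getD i ' ') = true) then none
        else some (num ++ ((cs.reverse.drop i).takeWhile PySem.Chars.isdigit).map digitVal) := by
    intro k
    induction k with
    | zero =>
      intro i num hk hi
      have hieq : i = cs.length := by omega
      subst hieq
      rw [gvnGo]
      rw [dif_neg (by omega), if_neg (by omega)]
      rw [List.drop_eq_nil_of_le (by simp)]
      simp
    | succ k ih =>
      intro i num hk hi
      rw [gvnGo]
      by_cases h : i < cs.length
      · rw [dif_pos h]
        simp only [pyGet_rev cs i h]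
        have hrl : i < cs.reverse.length := by simpa using h
        have hdrop : cs.reverse.drop i = cs.reverse.getD i ' ' :: cs.reverse.drop (i + 1) := by
          rw [List.getD_eq_getElem _ _ hrl]
          exact List.drop_eq_getElem_cons hrl
        by_cases hdig : PySem.Chars.isdigit (cs.reverse.getD i ' ') = true
        · rw [if_pos hdig, ih (i + 1) (num ++ [digitVal (cs.reverse.getD i ' ')]) (by omega) (by omega)]
          rw [if_neg (by omega), if_neg (fun hc => hc.2.2 hdig)]
          rw [hdrop, List.takeWhile_cons_of_pos hdig]
          simp
        · rw [if_neg hdig]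
          by_cases hi0 : i = 0
          · subst hi0
            rw [if_pos (show _ ∧ _ ∧ _ from ⟨h, rfl, hdig⟩)]
            simp
          · rw [if_neg hi0, if_neg (fun hc => hi0 hc.2.1)]
            rw [hdrop, List.takeWhile_cons_of_neg (by simpa using hdig)]
            simp
      · rw [dif_neg h, if_neg (by omega)]
        rw [List.drop_eq_nil_of_le (by simp; omega)]
        simp
  exact fun i num hi => H cs.length i num (by omega) hi

lemma bpos_spec (cs : List Char) : ∀ pos, pos ≤ cs.length →
    bpos cs pos = pos - ((cs.take pos).reverse.takeWhile PySem.Chars.isdigit).length := by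
  intro pos
  induction pos with
  | zero => intro _; rw [bpos]; simp
  | succ p ih =>
    intro h
    have hp : p < cs.length := by omega
    rw [bpos, dif_pos (by omega)]
    simp only [Nat.add_sub_cancel]
    have hc : cs.getD p ' ' = cs[p] := List.getD_eq_getElem _ _ hp
    have htake : (cs.take (p + 1)).reverse = cs[p] :: (cs.take p).reverse := by
      rw [List.take_add_one]
      simp [List.getElem?_eq_getElem hp]
    rw [hc, htake]
    by_cases hdig : '0' ≤ cs[p] ∧ cs[p] ≤ '9'
    · rw [if_pos hdig, ih (by omega)]
      rw [List.takeWhile_cons_of_pos (by rw [isdigit_iff]; exact hdig)]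
      have hle : ((cs.take p).reverse.takeWhile PySem.Chars.isdigit).length ≤ p := by
        calc ((cs.take p).reverse.takeWhile PySem.Chars.isdigit).length
            ≤ (cs.take p).reverse.length := (List.takeWhile_sublist _).length_le
          _ = (cs.take p).length := by simp
          _ ≤ p := by simp
      simp only [List.length_cons]
      omega
    · rw [if_neg hdig]
      rw [List.takeWhile_cons_of_neg (by rw [isdigit_iff]; simpa using hdig)]
      simp

lemma valLE_append_singleton (m : List Int) (d : Int) :
    valLE (m ++ [d]) = valLE m + d * 10 ^ m.length := by
  induction m with
  | nil => simp [valLE]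
  | cons a t ih =>
    simp only [List.cons_append, valLE_cons, ih, List.length_cons]
    ring

lemma foldB (ds : List Char) : ∀ acc : Int,
    List.foldl (fun n ch => n * 10 + ((ch.toNat : Int) - 48)) acc ds
      = acc * 10 ^ ds.length + valLE ((ds.map digitVal).reverse) := by
  induction ds with
  | nil => intro acc; simp [valLE]
  | cons c ds ih =>
    intro acc
    rw [List.foldl_cons, ih]
    simp only [List.map_cons, List.reverse_cons, valLE_append_singleton, List.length_cons,
      List.length_reverse, List.length_map]
    show (acc * 10 + digitVal c) * 10 ^ ds.length + _ = _
    ring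

lemma core (fn suffix : List Char) :
    (match getVersionNum fn with
     | none => String.ofList (fn ++ ['_', '0'] ++ suffix)
     | some version =>
       if version.length = 0 then String.ofList (fn ++ ['_', '0'] ++ suffix)
       else
         String.ofList (PySem.List.slice fn none (some ((fn.length - version.length : Nat) : Int)) ++
           PySem.Chars.join [] (((aloop version.reverse 0 true).reverse).map PySem.Int.toChars) ++ suffix))
    = (let pos := bpos fn fn.length
       let digits := PySem.List.slice fn (some (pos : Int)) none
       if digits = [] then String.ofList (fn ++ ['_', '0'] ++ suffix)
       else
         String.ofList (PySem.List.slice fn none (some (pos : Int)) ++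
           PySem.Chars.zfill
             (PySem.Int.toChars (digits.foldl (fun n ch => n * 10 + ((ch.toNat : Int) - 48)) 0 + 1))
             (digits.length : Int) ++ suffix)) := by
  have hlen : fn.reverse.length = fn.length := by simp
  set tw := fn.reverse.takeWhile PySem.Chars.isdigit with htw
  set dw := fn.reverse.dropWhile PySem.Chars.isdigit with hdw
  have hsplit : tw ++ dw = fn.reverse := List.takeWhile_append_dropWhile
  have hlens : tw.length + dw.length = fn.length := by
    rw [← hlen, ← hsplit]; simp
  have hktle : tw.length ≤ fn.length := by omega
  have hfn : fn = dw.reverse ++ tw.reverse := by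
    conv_lhs => rw [← List.reverse_reverse fn, ← hsplit]
    simp
  have hpos : bpos fn fn.length = fn.length - tw.length := by
    rw [bpos_spec fn fn.length le_rfl, List.take_length]
  have hdrop : List.drop (fn.length - tw.length) fn = tw.reverse := by
    conv_lhs => rw [hfn]
    apply List.drop_left'
    simp only [List.length_append, List.length_reverse]
    omega
  have htake : List.take (fn.length - tw.length) fn = dw.reverse := by
    conv_lhs => rw [hfn]
    apply List.take_left'
    simp only [List.length_append, List.length_reverse]
    omega
  have hdigits : PySem.List.slice fn (some ((fn.length - tw.length : Nat) : Int)) none = tw.reverse := by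
    rw [PySem.List.slice_from_natCast, hdrop]
  have hgvn : getVersionNum fn =
      if 0 < fn.length ∧ ¬ (PySem.Chars.isdigit (fn.reverse.getD 0 ' ') = true)
      then none else some ((tw.map digitVal).reverse) := by
    unfold getVersionNum
    rw [gvnGo_spec fn 0 [] (by omega)]
    split
    · rename_i hcond
      rw [if_pos ⟨hcond.1, hcond.2.2⟩]
      simp
    · rename_i hcond
      rw [if_neg (by intro hc; exact hcond ⟨hc.1, rfl, hc.2⟩)]
      simp [htw]
  by_cases htwnil : tw = []
  · -- no trailing digits: both take the '_0' branch
    rw [hgvn]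
    have hdig0 : PySem.List.slice fn (some ((fn.length - tw.length : Nat) : Int)) none = [] := by
      rw [hdigits, htwnil, List.reverse_nil]
    have hrhs : (let pos := bpos fn fn.length
       let digits := PySem.List.slice fn (some (pos : Int)) none
       if digits = [] then String.ofList (fn ++ ['_', '0'] ++ suffix)
       else
         String.ofList (PySem.List.slice fn none (some (pos : Int)) ++
           PySem.Chars.zfill
             (PySem.Int.toChars (digits.foldl (fun n ch => n * 10 + ((ch.toNat : Int) - 48)) 0 + 1))
             (digits.length : Int) ++ suffix)) = String.ofList (fn ++ ['_', '0'] ++ suffix) := by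
      simp only [hpos]
      rw [hdig0]
      simp
    rw [hrhs]
    by_cases hc : 0 < fn.length ∧ ¬ (PySem.Chars.isdigit (fn.reverse.getD 0 ' ') = true)
    · rw [if_pos hc]
    · rw [if_neg hc, htwnil]
      simp
  · -- trailing digits exist
    have hRne : fn.reverse ≠ [] := by
      intro hc
      apply htwnil
      rw [htw, hc]
      simp
    have hlenpos : 0 < fn.length := by
      rcases Nat.eq_zero_or_pos fn.length with h0 | h0
      · exact absurd (by simpa using (List.length_eq_zero_iff).1 (by simp [h0]) : fn.reverse = []) hRne
      · exact h0
    have htwdig : ∀ c ∈ tw, PySem.Chars.isdigit c = true := fun c hc => List.mem_takeWhile_imp hc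
    have hhead : PySem.Chars.isdigit (fn.reverse.getD 0 ' ') = true := by
      cases hc : tw with
      | nil => exact absurd hc htwnil
      | cons c t =>
        have : fn.reverse.getD 0 ' ' = c := by
          have := hsplit
          rw [hc] at this
          rw [← this]
          rfl
        rw [this]
        exact htwdig c (by rw [hc]; simp)
    rw [hgvn, if_neg (by intro hc; exact hc.2 hhead)]
    have hvlen : ((tw.map digitVal).reverse).length = tw.length := by simp
    have hlnz : ¬ (((tw.map digitVal).reverse).length = 0) := by
      simp only [hvlen]
      intro hc
      exact htwnil (List.length_eq_zero_iff.mp hc)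
    show (if ((tw.map digitVal).reverse).length = 0 then _ else _) = _
    rw [if_neg hlnz]
    simp only [hpos, hvlen, List.reverse_reverse]
    rw [hdigits]
    have hdnz : ¬ (tw.reverse = []) := by simpa using htwnil
    rw [if_neg hdnz]
    rw [PySem.List.slice_to_natCast, htake]
    rw [join_empty_sep]
    rw [aloop_main (tw.map digitVal) (by simpa using htwnil)
        (by intro d hd; rw [List.mem_map] at hd; obtain ⟨c, hc, rfl⟩ := hd; exact isdigit_val (htwdig c hc))]
    rw [foldB]
    simp only [List.map_reverse, List.reverse_reverse, List.length_reverse, List.length_map]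
    norm_num

-- ===== VERDICT (by name: the statement is the Claim_ definition above) =====
theorem increaseFileName_spec : Claim_equal_increaseFileName := by
  intro file_name has_suffix _hdom
  unfold Spec_increaseFileName increaseFileName increaseFileName_alt
  cases has_suffix <;> simp only [if_true, if_false, Bool.false_eq_true] <;> exact core _ _
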